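-- pv_equiv track=rewrite | github.com/malikpaetzold/Pluto | pluto.py | characters_filter_strict
-- ===== SOURCE A (Python) =====
-- def characters_filter_strict(inpt: str, allow_digits=True): # -> str
--     numbers =  list(range(128))
--     # only digits, uppercase, lowercase and spaces letters are valid
--     allowed_ascii_values = numbers[65:91] + numbers[97:123] + [32]
--     if allow_digits: allowed_ascii_values += numbers[48:58]
--
--     out = ""
--
--     for i in inpt:
--         if ord(i) in allowed_ascii_values: out += i
--
--     out = " ".join(out.split())
--
--     return out
-- ===== SOURCE B (Python) =====
-- def characters_filter_strict(inpt: str, allow_digits=True):  # -> str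
--     # Split on single spaces first, drop disallowed characters inside each piece,
--     # then join the nonempty pieces with single spaces.
--     def keep(c):
--         return 'A' <= c <= 'Z' or 'a' <= c <= 'z' or (allow_digits and '0' <= c <= '9')
--     pieces = (''.join(c for c in w if keep(c)) for w in inpt.split(' '))
--     return ' '.join(p for p in pieces if p)
-- ===== Notes on version B (the rewrite author's own statement) =====
-- stated objective: faster
-- what changed: Instead of scanning a 63-element ASCII-code membership list for every character and then whitespace-splitting the filtered string, B splits the input on single spaces first, filters each piece with direct character-range comparisons, and joins the nonempty pieces with single spaces.
import Mathlib
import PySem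

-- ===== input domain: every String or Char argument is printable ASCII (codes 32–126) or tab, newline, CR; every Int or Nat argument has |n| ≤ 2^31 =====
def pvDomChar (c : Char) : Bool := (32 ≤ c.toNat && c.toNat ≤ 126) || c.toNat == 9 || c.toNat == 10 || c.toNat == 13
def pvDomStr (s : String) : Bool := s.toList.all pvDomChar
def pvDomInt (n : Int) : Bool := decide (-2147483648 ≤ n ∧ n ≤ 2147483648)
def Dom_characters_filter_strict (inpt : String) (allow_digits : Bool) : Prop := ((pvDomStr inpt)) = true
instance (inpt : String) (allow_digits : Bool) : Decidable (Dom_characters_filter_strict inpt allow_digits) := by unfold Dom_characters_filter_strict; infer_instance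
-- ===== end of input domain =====

-- B splits on single spaces first and filters each piece by character-range tests;
-- A filters through an ASCII-code membership list and then whitespace-splits.

-- ===== PORT A =====
def characters_filter_strict (inpt : String) (allow_digits : Bool) : String :=
  let numbers : List Int := PySem.List.pyRange 0 128 1
  let allowed_ascii_values : List Int :=
    PySem.List.slice numbers (some 65) (some 91) ++ PySem.List.slice numbers (some 97) (some 123) ++ [(32 : Int)]
  let allowed_ascii_values : List Int :=
    if allow_digits then allowed_ascii_values ++ PySem.List.slice numbers (some 48) (some 58)
    else allowed_ascii_values
  let out : List Char :=
    inpt.toList.foldl (fun out i => if ((i.toNat : Int) ∈ allowed_ascii_values) then out ++ [i] else out) []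
  String.mk (PySem.Chars.join " ".toList (PySem.Chars.split₀ out))

-- ===== PORT B =====
def pvKeep (allow_digits : Bool) (c : Char) : Bool :=
  (65 ≤ c.toNat && c.toNat ≤ 90) || (97 ≤ c.toNat && c.toNat ≤ 122) ||
    (allow_digits && (48 ≤ c.toNat && c.toNat ≤ 57))

def characters_filter_strict_alt (inpt : String) (allow_digits : Bool) : String :=
  let pieces := (PySem.Chars.splitOn inpt.toList [' ']).map (List.filter (pvKeep allow_digits))
  String.mk (PySem.Chars.join [' '] (pieces.filter (· ≠ [])))

-- ===== PRECONDITION & SPEC =====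
def Spec_characters_filter_strict (inpt : String) (allow_digits : Bool) (out : String) : Prop := out = characters_filter_strict_alt inpt allow_digits
instance (inpt : String) (allow_digits : Bool) (out : String) : Decidable (Spec_characters_filter_strict inpt allow_digits out) := by unfold Spec_characters_filter_strict; infer_instance

-- ===== CLAIM (what is proved, stated in full; the proofs are below) =====
def Claim_equal_characters_filter_strict : Prop := ∀ (inpt : String) (allow_digits : Bool), Dom_characters_filter_strict inpt allow_digits → Spec_characters_filter_strict inpt allow_digits (characters_filter_strict inpt allow_digits)

-- ===== LEMMAS AND PROOFS =====

-- clean recursive form of Chars.split₀ (cur kept in order)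
def pvSp0 : List Char → List Char → List (List Char)
  | [], cur => if cur = [] then [] else [cur]
  | c :: rest, cur =>
    if PySem.Chars.isspace c then (if cur = [] then pvSp0 rest [] else cur :: pvSp0 rest [])
    else pvSp0 rest (cur ++ [c])

-- clean recursive form of Chars.splitOn · [' ']
def pvSpOn : List Char → List Char → List (List Char)
  | [], cur => [cur]
  | c :: rest, cur => if c = ' ' then cur :: pvSpOn rest [] else pvSpOn rest (cur ++ [c])

lemma pvSplit0_go_eq (l : List Char) : ∀ (cur : List Char) (acc : List (List Char)),
    PySem.Chars.split₀.go l cur acc = acc.reverse ++ pvSp0 l cur.reverse := by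
  induction l with
  | nil =>
    intro cur acc
    rw [PySem.Chars.split₀.go]
    by_cases hc : cur = [] <;> simp [pvSp0, hc, List.isEmpty_iff]
  | cons c rest ih =>
    intro cur acc
    rw [PySem.Chars.split₀.go]
    by_cases hs : PySem.Chars.isspace c
    · by_cases hc : cur = []
      · simp [pvSp0, hs, hc, List.isEmpty_iff, ih]
      · simp [pvSp0, hs, hc, List.isEmpty_iff, ih, List.reverse_eq_nil_iff]
    · simpa [pvSp0, hs, ih] using ih (c :: cur) acc

lemma pvSplit0_eq (l : List Char) : PySem.Chars.split₀ l = pvSp0 l [] := by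
  simpa using pvSplit0_go_eq l [] []

lemma pvSplitOn_go_eq : ∀ (fuel : Nat) (l cur : List Char) (acc : List (List Char)), l.length < fuel →
    PySem.Chars.splitOn.go [' '] fuel l cur acc = acc.reverse ++ pvSpOn l cur.reverse := by
  intro fuel
  induction fuel with
  | zero => intro l cur acc h; omega
  | succ fuel ih =>
    intro l cur acc h
    cases l with
    | nil =>
      rw [PySem.Chars.splitOn.go]
      simp [pvSpOn]
      omega
    | cons c rest =>
      rw [PySem.Chars.splitOn.go]
      by_cases hc : c = ' '
      · subst hc
        have hp : [' '].isPrefixOf (' ' :: rest) = true := by simp [List.isPrefixOf]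
        simp only [hp, if_true, List.length_cons, List.drop_succ_cons, List.drop_zero,
          List.length_nil]
        rw [ih rest [] (cur.reverse :: acc) (by simp at h; omega)]
        simp [pvSpOn]
      · have hp : [' '].isPrefixOf (c :: rest) = false := by
          simp [List.isPrefixOf]; exact fun h' => (hc h'.symm).elim
        simp only [hp, Bool.false_eq_true, if_false]
        rw [ih rest (c :: cur) acc (by simp at h; omega)]
        simp [pvSpOn, hc]

lemma pvSplitOn_eq (l : List Char) : PySem.Chars.splitOn l [' '] = pvSpOn l [] := by
  simpa using pvSplitOn_go_eq (l.length + 1) l [] [] (by omega)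

lemma pvKeep_not_space {d : Bool} {c : Char} (h : pvKeep d c = true) : PySem.Chars.isspace c = false := by
  simp [pvKeep] at h
  simp [PySem.Chars.isspace]
  omega

lemma pvKeep_space (d : Bool) : pvKeep d ' ' = false := by cases d <;> decide

-- the core: filtering then whitespace-splitting equals splitting on ' ' then filtering each piece
lemma pvCore (d : Bool) (l : List Char) : ∀ cur : List Char,
    pvSp0 (l.filter (fun c => pvKeep d c || c == ' ')) (cur.filter (pvKeep d)) =
      ((pvSpOn l cur).map (List.filter (pvKeep d))).filter (· ≠ []) := by
  induction l with
  | nil =>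
    intro cur
    by_cases hc : cur.filter (pvKeep d) = [] <;> simp [pvSp0, pvSpOn, hc]
  | cons c rest ih =>
    intro cur
    by_cases hk : pvKeep d c = true
    · have hcs : c ≠ ' ' := by
        intro h; rw [h, pvKeep_space] at hk; exact Bool.false_ne_true hk
      have h1 : cur.filter (pvKeep d) ++ [c] = (cur ++ [c]).filter (pvKeep d) := by
        simp [List.filter_append, hk]
      simp only [List.filter_cons, hk, Bool.true_or, if_true, pvSp0, pvKeep_not_space hk,
        Bool.false_eq_true, if_false, pvSpOn, hcs, h1]
      exact ih (cur ++ [c])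
    · by_cases hcs : c = ' '
      · subst hcs
        have hsp : PySem.Chars.isspace ' ' = true := by decide
        simp only [List.filter_cons, hk, Bool.false_or, beq_self_eq_true, if_true, pvSp0, hsp,
          pvSpOn, if_true, List.map_cons, List.filter_cons (xs := List.filter (pvKeep d) cur :: _)]
        by_cases hc : cur.filter (pvKeep d) = []
        · simpa [hc] using ih []
        · simpa [hc] using congrArg (List.filter (pvKeep d) cur :: ·) (ih [])
      · have h1 : (cur ++ [c]).filter (pvKeep d) = cur.filter (pvKeep d) := by
          simp [List.filter_append, hk]
        simp only [List.filter_cons, hk, hcs, beq_iff_eq, Bool.false_or, if_neg,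
          Bool.false_eq_true, if_false, pvSpOn]
        rw [← h1]
        exact ih (cur ++ [c])

-- A's allowed-values list characterised
set_option maxRecDepth 8192 in
lemma pvAllowed_mem (d : Bool) (x : Int) :
    (x ∈ (if d then
        (PySem.List.slice (PySem.List.pyRange 0 128 1) (some 65) (some 91) ++
          PySem.List.slice (PySem.List.pyRange 0 128 1) (some 97) (some 123) ++ [(32 : Int)]) ++
          PySem.List.slice (PySem.List.pyRange 0 128 1) (some 48) (some 58)
      else
        PySem.List.slice (PySem.List.pyRange 0 128 1) (some 65) (some 91) ++
          PySem.List.slice (PySem.List.pyRange 0 128 1) (some 97) (some 123) ++ [(32 : Int)])) ↔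
    ((65 ≤ x ∧ x ≤ 90) ∨ (97 ≤ x ∧ x ≤ 122) ∨ x = 32 ∨ (d = true ∧ 48 ≤ x ∧ x ≤ 57)) := by
  have h1 : PySem.List.slice (PySem.List.pyRange 0 128 1) (some 65) (some 91) = PySem.List.pyRange 65 91 1 := by decide
  have h2 : PySem.List.slice (PySem.List.pyRange 0 128 1) (some 97) (some 123) = PySem.List.pyRange 97 123 1 := by decide
  have h3 : PySem.List.slice (PySem.List.pyRange 0 128 1) (some 48) (some 58) = PySem.List.pyRange 48 58 1 := by decide
  cases d <;>
    simp [h1, h2, h3, PySem.List.mem_pyRange_one] <;> omega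

lemma pvFoldl_filter (allowed : List Int) (l : List Char) :
    l.foldl (fun out i => if ((i.toNat : Int) ∈ allowed) then out ++ [i] else out) ([] : List Char) =
      l.filter (fun i => decide ((i.toNat : Int) ∈ allowed)) := by
  simpa using PySem.List.foldl_append_if (fun i : Char => decide ((i.toNat : Int) ∈ allowed)) id l []

lemma pvChar_eq_space_iff (c : Char) : c = ' ' ↔ c.toNat = 32 := by
  constructor
  · intro h; subst h; rfl
  · intro h
    exact Char.ext (UInt32.toNat_inj.mp h)

lemma pvMem_eq_keep (d : Bool) (c : Char) :
    (decide ((c.toNat : Int) ∈ (if d then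
        (PySem.List.slice (PySem.List.pyRange 0 128 1) (some 65) (some 91) ++
          PySem.List.slice (PySem.List.pyRange 0 128 1) (some 97) (some 123) ++ [(32 : Int)]) ++
          PySem.List.slice (PySem.List.pyRange 0 128 1) (some 48) (some 58)
      else
        PySem.List.slice (PySem.List.pyRange 0 128 1) (some 65) (some 91) ++
          PySem.List.slice (PySem.List.pyRange 0 128 1) (some 97) (some 123) ++ [(32 : Int)]))) =
    (pvKeep d c || c == ' ') := by
  have hm := pvAllowed_mem d (c.toNat : Int)
  rw [Bool.eq_iff_iff]
  simp only [decide_eq_true_eq, Bool.or_eq_true, pvKeep, Bool.and_eq_true, beq_iff_eq, hm,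
    pvChar_eq_space_iff]
  cases d <;> simp <;> omega

-- ===== VERDICT (by name: the statement is the Claim_ definition above) =====
theorem characters_filter_strict_spec : Claim_equal_characters_filter_strict := by
  intro inpt d _
  unfold Spec_characters_filter_strict characters_filter_strict characters_filter_strict_alt
  simp only []
  rw [pvFoldl_filter]
  rw [List.filter_congr (q := fun c => pvKeep d c || c == ' ') (fun c _ => pvMem_eq_keep d c)]
  have hws : " ".toList = [' '] := by decide
  rw [hws, pvSplit0_eq, pvSplitOn_eq]
  have := pvCore d inpt.toList []
  simp only [List.filter_nil] at this
  rw [this]
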